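-- pv_equiv track=rewrite | github.com/Rinku-kowa/Rin-Rin-VTA | modules/speech_to_text.py | limpiar_errores_comunes
-- ===== SOURCE A (Python) =====
-- def limpiar_errores_comunes(texto: str) -> str:
--     reemplazos = {
--         "you tube": "youtube",
--         "play list": "playlist",
--         "de the": "de",
--     }
--     for error, correccion in reemplazos.items():
--         texto = texto.replace(error, correccion)
--     return texto
-- ===== SOURCE B (Python) =====
-- def limpiar_errores_comunes(texto: str) -> str:
--     # Single left-to-right pass: at each position try the three error phrases
--     # (they are mutually non-overlapping and no correction re-creates a match),
--     # instead of three sequential whole-string replace passes.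
--     out = []
--     i = 0
--     n = len(texto)
--     while i < n:
--         if texto.startswith("you tube", i):
--             out.append("youtube")
--             i += 8
--         elif texto.startswith("play list", i):
--             out.append("playlist")
--             i += 9
--         elif texto.startswith("de the", i):
--             out.append("de")
--             i += 6
--         else:
--             out.append(texto[i])
--             i += 1
--     return "".join(out)
-- ===== Notes on version B (the rewrite author's own statement) =====
-- stated objective: alternative
-- what changed: replaces A's three sequential whole-string str.replace passes by a single left-to-right scan that tries the three error phrases at each position (the phrases are mutually non-overlapping and no correction re-creates a match, so one pass gives the same result)
import Mathlib
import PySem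

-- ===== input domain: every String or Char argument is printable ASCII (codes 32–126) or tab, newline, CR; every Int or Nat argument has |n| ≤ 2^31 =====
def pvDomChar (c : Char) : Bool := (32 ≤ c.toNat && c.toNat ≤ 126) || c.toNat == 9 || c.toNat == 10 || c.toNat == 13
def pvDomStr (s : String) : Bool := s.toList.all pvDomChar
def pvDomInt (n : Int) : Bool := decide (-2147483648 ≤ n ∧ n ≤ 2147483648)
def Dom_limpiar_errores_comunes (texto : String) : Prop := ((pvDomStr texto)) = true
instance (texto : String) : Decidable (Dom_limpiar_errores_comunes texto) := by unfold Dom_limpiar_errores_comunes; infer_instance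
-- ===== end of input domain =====

-- B replaces A's three sequential whole-string .replace passes by one left-to-right scan
-- that matches the three error phrases in a single pass (alternative decomposition, same result).

-- ===== PORT A =====
-- for error, correccion in reemplazos.items(): texto = texto.replace(error, correccion)
def limpiar_errores_comunes (texto : String) : String :=
  let reemplazos : PySem.Dict String String :=
    PySem.Dict.ofList [("you tube", "youtube"), ("play list", "playlist"), ("de the", "de")]
  reemplazos.items.foldl (fun t p => PySem.Str.replace t p.1 p.2) texto

-- ===== PORT B =====
-- the while loop of Source B: at position i try each phrase; on a match emit the correction and
-- skip the phrase, else emit the character (texto.startswith(w, i) = w.isPrefixOf (drop i), and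
-- the list argument here IS the remaining suffix texto[i:])
def scanGo : List Char → List Char
  | [] => []
  | c :: t =>
    if "you tube".toList.isPrefixOf (c :: t) then
      "youtube".toList ++ scanGo (List.drop 7 t)
    else if "play list".toList.isPrefixOf (c :: t) then
      "playlist".toList ++ scanGo (List.drop 8 t)
    else if "de the".toList.isPrefixOf (c :: t) then
      "de".toList ++ scanGo (List.drop 5 t)
    else
      c :: scanGo t
termination_by s => s.length
decreasing_by
  · simp
  · simp
  · simp
  · simp

def limpiar_errores_comunes_alt (texto : String) : String :=
  String.ofList (scanGo texto.toList)

-- ===== PRECONDITION & SPEC =====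
def Spec_limpiar_errores_comunes (texto : String) (out : String) : Prop := out = limpiar_errores_comunes_alt texto
instance (texto : String) (out : String) : Decidable (Spec_limpiar_errores_comunes texto out) := by unfold Spec_limpiar_errores_comunes; infer_instance

-- ===== CLAIM (what is proved, stated in full; the proofs are below) =====
def Claim_equal_limpiar_errores_comunes : Prop := ∀ (texto : String), Dom_limpiar_errores_comunes texto → Spec_limpiar_errores_comunes texto (limpiar_errores_comunes texto)

-- ===== LEMMAS AND PROOFS =====

-- the three patterns and replacements as explicit char lists
-- (p1 = "you tube" → r1 = "youtube", p2 = "play list" → r2 = "playlist", p3 = "de the" → r3 = "de")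

-- a generic one-pattern scanner: what one pass of str.replace (old = o :: os nonempty) computes
def repl (o : Char) (os : List Char) (new : List Char) : List Char → List Char
  | [] => []
  | c :: t =>
    if (o :: os).isPrefixOf (c :: t) then new ++ repl o os new (List.drop os.length t)
    else c :: repl o os new t
termination_by s => s.length
decreasing_by
  · simp
  · simp

theorem go_eq (o : Char) (os new : List Char) :
    ∀ fuel l acc, l.length ≤ fuel →
      PySem.Chars.replace.go (o :: os) new fuel l acc = acc.reverse ++ repl o os new l := by
  intro fuel
  induction fuel with
  | zero =>
    intro l acc h; simp at h; subst h; simp [PySem.Chars.replace.go, repl]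
  | succ n ih =>
    intro l acc h
    match l with
    | [] => simp [PySem.Chars.replace.go, repl]
    | c :: t =>
      rw [PySem.Chars.replace.go]
      by_cases hp : (o :: os).isPrefixOf (c :: t)
      · rw [if_pos hp, ih _ _ (by simp at h ⊢; omega), repl, if_pos hp]
        simp
      · rw [if_neg hp, ih _ _ (by simp at h ⊢; omega), repl, if_neg hp]
        simp

theorem replace_eq (o : Char) (os new : List Char) (s : List Char) :
    PySem.Chars.replace s (o :: os) new = repl o os new s := by
  rw [PySem.Chars.replace]
  simp [go_eq o os new s.length s [] (le_refl _)]

theorem prefixOf_cons_iff (a b : Char) (as bs : List Char) :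
    ((a :: as).isPrefixOf (b :: bs)) = true ↔ a = b ∧ as.isPrefixOf bs = true := by
  simp [List.isPrefixOf]

-- abbreviations for the three instantiated scanners
def repl1 : List Char → List Char := repl 'y' ['o','u',' ','t','u','b','e'] ['y','o','u','t','u','b','e']
def repl2 : List Char → List Char := repl 'p' ['l','a','y',' ','l','i','s','t'] ['p','l','a','y','l','i','s','t']
def repl3 : List Char → List Char := repl 'd' ['e',' ','t','h','e'] ['d','e']

-- prefix transfer: a suffix w of "play list" is a prefix of repl1 t only where it already was one of t
-- (no replacement "you tube" → "youtube" can create a new "play list" match)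
theorem Q12 : ∀ n t, List.length t ≤ n → ∀ w,
    w ∈ (['p','l','a','y',' ','l','i','s','t'] : List Char).tails →
    w.isPrefixOf (repl1 t) = true → w.isPrefixOf t = true := by
  intro n
  induction n with
  | zero =>
    intro t ht w hw h
    simp at ht; subst ht
    simp_all [repl1, repl]
  | succ n ih =>
    intro t ht w hw h
    match t with
    | [] => simp_all [repl1, repl]
    | c :: t' =>
      rw [repl1, repl] at h
      by_cases hp : (('y' :: ['o','u',' ','t','u','b','e']).isPrefixOf (c :: t')) = true
      · rw [if_pos hp] at h
        -- repl1 t begins with "youtube"; no nonempty suffix of "play list" is a prefix of that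
        fin_cases hw <;> first
          | rfl
          | (simp [List.isPrefixOf] at h)
      · rw [if_neg hp] at h
        fin_cases hw <;> first
          | rfl
          | (rw [prefixOf_cons_iff] at h
             obtain ⟨rfl, h2⟩ := h
             rw [prefixOf_cons_iff]
             exact ⟨rfl, ih t' (by simp at ht; omega) _ (by decide) h2⟩)

-- same for suffixes of "de the" through repl1 ("youtube" contains none of their first characters)
theorem Q13 : ∀ n t, List.length t ≤ n → ∀ w,
    w ∈ (['d','e',' ','t','h','e'] : List Char).tails →
    w.isPrefixOf (repl1 t) = true → w.isPrefixOf t = true := by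
  intro n
  induction n with
  | zero =>
    intro t ht w hw h
    simp at ht; subst ht
    simp_all [repl1, repl]
  | succ n ih =>
    intro t ht w hw h
    match t with
    | [] => simp_all [repl1, repl]
    | c :: t' =>
      rw [repl1, repl] at h
      by_cases hp : (('y' :: ['o','u',' ','t','u','b','e']).isPrefixOf (c :: t')) = true
      · rw [if_pos hp] at h
        fin_cases hw <;> first
          | rfl
          | (simp [List.isPrefixOf] at h)
      · rw [if_neg hp] at h
        fin_cases hw <;> first
          | rfl
          | (rw [prefixOf_cons_iff] at h
             obtain ⟨rfl, h2⟩ := h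
             rw [prefixOf_cons_iff]
             exact ⟨rfl, ih t' (by simp at ht; omega) _ (by decide) h2⟩)

-- and through repl2 ("playlist" starts with 'p')
theorem Q23 : ∀ n t, List.length t ≤ n → ∀ w,
    w ∈ (['d','e',' ','t','h','e'] : List Char).tails →
    w.isPrefixOf (repl2 t) = true → w.isPrefixOf t = true := by
  intro n
  induction n with
  | zero =>
    intro t ht w hw h
    simp at ht; subst ht
    simp_all [repl2, repl]
  | succ n ih =>
    intro t ht w hw h
    match t with
    | [] => simp_all [repl2, repl]
    | c :: t' =>
      rw [repl2, repl] at h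
      by_cases hp : (('p' :: ['l','a','y',' ','l','i','s','t']).isPrefixOf (c :: t')) = true
      · rw [if_pos hp] at h
        fin_cases hw <;> first
          | rfl
          | (simp [List.isPrefixOf] at h)
      · rw [if_neg hp] at h
        fin_cases hw <;> first
          | rfl
          | (rw [prefixOf_cons_iff] at h
             obtain ⟨rfl, h2⟩ := h
             rw [prefixOf_cons_iff]
             exact ⟨rfl, ih t' (by simp at ht; omega) _ (by decide) h2⟩)

-- distribution lemmas over the corrections / disjoint pattern prefixes
theorem repl2_r1 (x : List Char) :
    repl2 (['y','o','u','t','u','b','e'] ++ x) = ['y','o','u','t','u','b','e'] ++ repl2 x := by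
  simp [repl2, repl, List.isPrefixOf]

theorem repl3_r1 (x : List Char) :
    repl3 (['y','o','u','t','u','b','e'] ++ x) = ['y','o','u','t','u','b','e'] ++ repl3 x := by
  simp [repl3, repl, List.isPrefixOf]

theorem repl3_r2 (x : List Char) :
    repl3 (['p','l','a','y','l','i','s','t'] ++ x) = ['p','l','a','y','l','i','s','t'] ++ repl3 x := by
  simp [repl3, repl, List.isPrefixOf]

theorem repl1_p2 (u : List Char) :
    repl1 (['p','l','a','y',' ','l','i','s','t'] ++ u) = ['p','l','a','y',' ','l','i','s','t'] ++ repl1 u := by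
  simp [repl1, repl, List.isPrefixOf]

theorem repl1_p3 (u : List Char) :
    repl1 (['d','e',' ','t','h','e'] ++ u) = ['d','e',' ','t','h','e'] ++ repl1 u := by
  simp [repl1, repl, List.isPrefixOf]

theorem repl2_p3 (u : List Char) :
    repl2 (['d','e',' ','t','h','e'] ++ u) = ['d','e',' ','t','h','e'] ++ repl2 u := by
  simp [repl2, repl, List.isPrefixOf]

theorem repl2_match (x : List Char) :
    repl2 (['p','l','a','y',' ','l','i','s','t'] ++ x) = ['p','l','a','y','l','i','s','t'] ++ repl2 x := by
  simp [repl2, repl, List.isPrefixOf]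

theorem repl3_match (x : List Char) :
    repl3 (['d','e',' ','t','h','e'] ++ x) = ['d','e'] ++ repl3 x := by
  simp [repl3, repl, List.isPrefixOf]

-- the three sequential passes compute the single pass
theorem main_eq : ∀ n s, List.length s ≤ n → repl3 (repl2 (repl1 s)) = scanGo s := by
  intro n
  induction n with
  | zero =>
    intro s hs; simp at hs; subst hs
    simp [repl1, repl2, repl3, repl, scanGo]
  | succ n ih =>
    intro s hs
    match s with
    | [] => simp [repl1, repl2, repl3, repl, scanGo]
    | c :: t =>
      rw [scanGo]
      by_cases h1 : ("you tube".toList.isPrefixOf (c :: t)) = true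
      · rw [if_pos h1]
        have e1 : repl1 (c :: t) = ['y','o','u','t','u','b','e'] ++ repl1 (List.drop 7 t) := by
          rw [repl1, repl, if_pos (by simpa using h1)]
          norm_num
        rw [e1, repl2_r1, repl3_r1, ih _ (by simp at hs ⊢; omega)]
        rfl
      · rw [if_neg h1]
        by_cases h2 : ("play list".toList.isPrefixOf (c :: t)) = true
        · rw [if_pos h2]
          obtain ⟨u, hu⟩ := List.isPrefixOf_iff_prefix.mp (by simpa using h2 :
            (['p','l','a','y',' ','l','i','s','t'] : List Char).isPrefixOf (c :: t) = true)
          rw [← hu, repl1_p2, repl2_match, repl3_r2, ih u (by rw [← hu] at hs; simp at hs ⊢; omega)]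
          have hdrop : List.drop 8 t = u := by
            have : List.drop 9 (c :: t) = u := by rw [← hu]; simp
            simpa using this
          rw [hdrop]
          rfl
        · rw [if_neg h2]
          by_cases h3 : ("de the".toList.isPrefixOf (c :: t)) = true
          · rw [if_pos h3]
            obtain ⟨u, hu⟩ := List.isPrefixOf_iff_prefix.mp (by simpa using h3 :
              (['d','e',' ','t','h','e'] : List Char).isPrefixOf (c :: t) = true)
            rw [← hu, repl1_p3, repl2_p3, repl3_match, ih u (by rw [← hu] at hs; simp at hs ⊢; omega)]
            have hdrop : List.drop 5 t = u := by
              have : List.drop 6 (c :: t) = u := by rw [← hu]; simp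
              simpa using this
            rw [hdrop]
            rfl
          · rw [if_neg h3]
            -- none of the phrases starts here: every pass keeps the head
            have e1 : repl1 (c :: t) = c :: repl1 t := by
              rw [repl1, repl, if_neg (by simpa [repl1] using h1)]
            have h2' : (['p','l','a','y',' ','l','i','s','t'] : List Char).isPrefixOf (repl1 (c :: t)) = false := by
              cases hb : (['p','l','a','y',' ','l','i','s','t'] : List Char).isPrefixOf (repl1 (c :: t)) with
              | false => rfl
              | true =>
                have := Q12 (c :: t).length (c :: t) (le_refl _)
                  ['p','l','a','y',' ','l','i','s','t'] (by decide) hb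
                simp [this] at h2
            have e2 : repl2 (repl1 (c :: t)) = c :: repl2 (repl1 t) := by
              rw [e1, repl2, repl, if_neg (by rw [e1] at h2'; simp [h2'])]
            have h3' : (['d','e',' ','t','h','e'] : List Char).isPrefixOf (repl2 (repl1 (c :: t))) = false := by
              cases hb : (['d','e',' ','t','h','e'] : List Char).isPrefixOf (repl2 (repl1 (c :: t))) with
              | false => rfl
              | true =>
                have hA := Q23 (repl1 (c :: t)).length (repl1 (c :: t)) (le_refl _)
                  ['d','e',' ','t','h','e'] (by decide) hb
                have hB := Q13 (c :: t).length (c :: t) (le_refl _)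
                  ['d','e',' ','t','h','e'] (by decide) hA
                simp [hB] at h3
            have e3 : repl3 (repl2 (repl1 (c :: t))) = c :: repl3 (repl2 (repl1 t)) := by
              rw [e2, repl3, repl, if_neg (by rw [e2] at h3'; simp [h3'])]
            rw [e3, ih t (by simp at hs; omega)]

-- ===== VERDICT (by name: the statement is the Claim_ definition above) =====
theorem limpiar_errores_comunes_spec : Claim_equal_limpiar_errores_comunes := by
  intro texto _
  unfold Spec_limpiar_errores_comunes limpiar_errores_comunes limpiar_errores_comunes_alt
  have hitems : (PySem.Dict.ofList [("you tube", "youtube"), ("play list", "playlist"),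
      ("de the", "de")] : PySem.Dict String String).items
      = [("you tube", "youtube"), ("play list", "playlist"), ("de the", "de")] := by decide
  show List.foldl (fun t p => PySem.Str.replace t p.1 p.2) texto
      (PySem.Dict.ofList [("you tube", "youtube"), ("play list", "playlist"), ("de the", "de")]).items
      = String.ofList (scanGo texto.toList)
  rw [hitems]
  show PySem.Str.replace (PySem.Str.replace (PySem.Str.replace texto "you tube" "youtube")
        "play list" "playlist") "de the" "de" = String.ofList (scanGo texto.toList)
  apply String.toList_inj.mp
  simp only [PySem.Str.toList_replace, String.toList_ofList,
    show ("you tube".toList) = 'y' :: ['o','u',' ','t','u','b','e'] from rfl,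
    show ("youtube".toList) = ['y','o','u','t','u','b','e'] from rfl,
    show ("play list".toList) = 'p' :: ['l','a','y',' ','l','i','s','t'] from rfl,
    show ("playlist".toList) = ['p','l','a','y','l','i','s','t'] from rfl,
    show ("de the".toList) = 'd' :: ['e',' ','t','h','e'] from rfl,
    show ("de".toList) = ['d','e'] from rfl]
  rw [replace_eq, replace_eq, replace_eq]
  exact main_eq texto.toList.length texto.toList (le_refl _)
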